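-- pv_equiv track=rewrite | github.com/RichardPotthoff/Morse | morse.py | reversemorse
-- ===== SOURCE A (Python) =====
-- def reversemorse(b):
--   if b==0:
--     return 0
--   a=1
--   while b>1:
--     a<<=1
--     a|=b&1
--     b>>=1
--   return a
-- ===== SOURCE B (Python) =====
-- def reversemorse(b):
--     if b == 0:
--         return 0
--     if b < 2:
--         return 1
--     s = bin(b)[2:]
--     return int('1' + s[:0:-1], 2)
-- ===== Notes on version B (the rewrite author's own statement) =====
-- stated objective: idiomatic
-- what changed: B replaces A's shift-and-or loop with Python's binary string representation: it takes bin(b), keeps the leading set bit and reverses the lower bits via a slice, then parses the result back with int(...,2).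
import Mathlib
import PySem

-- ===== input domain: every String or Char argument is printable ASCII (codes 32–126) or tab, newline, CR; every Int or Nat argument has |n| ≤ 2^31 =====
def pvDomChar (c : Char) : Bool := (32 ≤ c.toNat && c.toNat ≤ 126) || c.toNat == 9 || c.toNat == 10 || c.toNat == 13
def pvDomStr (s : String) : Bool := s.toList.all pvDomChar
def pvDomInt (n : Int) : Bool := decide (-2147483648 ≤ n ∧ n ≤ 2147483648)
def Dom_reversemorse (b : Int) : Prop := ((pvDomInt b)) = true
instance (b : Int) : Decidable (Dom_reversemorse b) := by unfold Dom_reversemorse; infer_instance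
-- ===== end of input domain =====

-- B reads the answer off the binary string representation instead of A's shift loop (idiomatic rewrite, same cost).

-- ===== PORT A =====
-- the while loop; a<<=1; a|=b&1 is 2*a + (b&1) since 2*a is even, and b&1 / b>>1
-- are exactly PySem.Int.mod b 2 / PySem.Int.floordiv b 2 (Python's floor semantics)
def reversemorseLoop (a b : Int) : Int :=
  if h : b > 1 then
    reversemorseLoop (2 * a + PySem.Int.mod b 2) (PySem.Int.floordiv b 2)
  else a
termination_by b.toNat
decreasing_by
  have := PySem.Int.floordiv_eq_ediv_of_pos (a := b) (b := 2) (by omega)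
  omega

def reversemorse (b : Int) : Int :=
  if b == 0 then 0 else reversemorseLoop 1 b

-- ===== PORT B =====
-- bin(n)[2:] for n ≥ 0, as a list of the chars '0'/'1', most significant first (exact)
def pvBinChars (n : Nat) : List Char :=
  if h : n < 2 then [Char.ofNat (48 + n)]
  else pvBinChars (n / 2) ++ [Char.ofNat (48 + n % 2)]

-- int(cs, 2) for a list of '0'/'1' chars (exact on such strings)
def pvParseBin (cs : List Char) : Int :=
  cs.foldl (fun acc c => 2 * acc + ((c.toNat : Int) - 48)) 0

def reversemorse_alt (b : Int) : Int :=
  if b == 0 then 0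
  else if b < 2 then 1
  else
    let s := pvBinChars b.toNat
    -- s[:0:-1] is s without its first char, reversed
    pvParseBin ('1' :: (s.drop 1).reverse)

-- ===== PRECONDITION & SPEC =====
def Spec_reversemorse (b : Int) (out : Int) : Prop := out = reversemorse_alt b
instance (b : Int) (out : Int) : Decidable (Spec_reversemorse b out) := by unfold Spec_reversemorse; infer_instance

-- ===== CLAIM (what is proved, stated in full; the proofs are below) =====
def Claim_equal_reversemorse : Prop := ∀ (b : Int), Dom_reversemorse b → Spec_reversemorse b (reversemorse b)

-- ===== LEMMAS AND PROOFS =====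

-- the low bits of n (below the leading bit), least significant first
def lsbs (n : Nat) : List Nat :=
  if n < 2 then [] else n % 2 :: lsbs (n / 2)

theorem lsbs_lt_two : ∀ n, ∀ d ∈ lsbs n, d < 2 := by
  intro n
  induction n using Nat.strong_induction_on with
  | _ n ih =>
    intro d hd
    unfold lsbs at hd
    split at hd
    · simp at hd
    · rw [List.mem_cons] at hd
      rcases hd with h | h
      · subst h; omega
      · exact ih (n / 2) (by omega) d h

theorem loop_eq_foldl : ∀ n : Nat, ∀ a : Int,
    reversemorseLoop a n = (lsbs n).foldl (fun acc d => 2 * acc + (d : Int)) a := by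
  intro n
  induction n using Nat.strong_induction_on with
  | _ n ih =>
    intro a
    unfold reversemorseLoop lsbs
    by_cases h : n < 2
    · have : ¬ ((n : Int) > 1) := by omega
      simp [this, h]
    · have hgt : (n : Int) > 1 := by omega
      rw [dif_pos hgt, if_neg h]
      have hd : PySem.Int.floordiv (n : Int) 2 = ((n / 2 : Nat) : Int) := by
        exact_mod_cast PySem.Int.floordiv_natCast n 2
      have hm : PySem.Int.mod (n : Int) 2 = ((n % 2 : Nat) : Int) := by
        exact_mod_cast PySem.Int.mod_natCast n 2
      rw [hd, hm, ih (n / 2) (by omega)]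
      simp

theorem pvBinChars_ne_nil (n : Nat) : pvBinChars n ≠ [] := by
  unfold pvBinChars
  split <;> simp

theorem drop_reverse_eq_map : ∀ n : Nat, 1 ≤ n →
    ((pvBinChars n).drop 1).reverse = (lsbs n).map (fun d => Char.ofNat (48 + d)) := by
  intro n
  induction n using Nat.strong_induction_on with
  | _ n ih =>
    intro hn
    unfold pvBinChars lsbs
    by_cases h : n < 2
    · simp [h]
    · rw [dif_neg h, if_neg h]
      have hne := pvBinChars_ne_nil (n / 2)
      obtain ⟨c, cs, hcs⟩ := List.exists_cons_of_ne_nil hne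
      rw [hcs]
      have := ih (n / 2) (by omega) (by omega)
      rw [hcs] at this
      simp at this ⊢
      exact this

theorem toNat_digit (d : Nat) (hd : d < 2) : (Char.ofNat (48 + d)).toNat = 48 + d := by
  interval_cases d <;> decide

theorem foldl_map_digits (l : List Nat) (hl : ∀ d ∈ l, d < 2) (a : Int) :
    (l.map (fun d => Char.ofNat (48 + d))).foldl
        (fun acc c => 2 * acc + ((c.toNat : Int) - 48)) a
      = l.foldl (fun acc d => 2 * acc + (d : Int)) a := by
  induction l generalizing a with
  | nil => rfl
  | cons d l ih =>
    simp only [List.map_cons, List.foldl_cons]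
    rw [toNat_digit d (hl d (by simp))]
    have : ((48 + d : Nat) : Int) - 48 = (d : Int) := by push_cast; ring
    rw [this]
    exact ih (fun d hd => hl d (by simp [hd])) _

-- ===== VERDICT (by name: the statement is the Claim_ definition above) =====
theorem reversemorse_spec : Claim_equal_reversemorse := by
  intro b _
  unfold Spec_reversemorse reversemorse reversemorse_alt
  by_cases h0 : b = 0
  · simp [h0]
  · rw [if_neg (by simpa using h0), if_neg (by simpa using h0)]
    by_cases h2 : b < 2
    · -- loop guard b > 1 is false immediately: A returns a = 1
      unfold reversemorseLoop
      rw [if_pos h2, dif_neg (by omega)]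
    · rw [if_neg h2]
      obtain ⟨n, rfl⟩ : ∃ n : Nat, b = (n : Int) := ⟨b.toNat, by omega⟩
      rw [loop_eq_foldl n 1]
      show _ = pvParseBin _
      unfold pvParseBin
      simp only [Int.toNat_natCast]
      rw [drop_reverse_eq_map n (by omega)]
      simp only [List.foldl_cons]
      rw [foldl_map_digits _ (lsbs_lt_two n)]
      congr 1
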